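-- pv_equiv track=rewrite | github.com/m-wall/advent-of-code-2024 | 12/day_12_part1.py | plot_perimeter
-- ===== SOURCE A (Python) =====
-- DIRECTIONS = [(-1, 0), (0, 1), (1, 0), (0, -1)]
--
-- def get_neighbours(current_position):
--     return [(current_position[0] + direction[0], current_position[1] + direction[1]) for direction in DIRECTIONS]
--
-- def plot_perimeter(plot):
--     perimeter = 0
--     for position in plot:
--         perimeter += 4
--         for neighbour in get_neighbours(position):
--             if neighbour in plot:
--                 perimeter -= 1
--     return perimeter
-- ===== SOURCE B (Python) =====
-- DIRECTIONS = [(-1, 0), (0, 1), (1, 0), (0, -1)]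
--
-- def plot_perimeter(plot):
--     cells = set(plot)
--     edges = 0
--     for (r, c) in cells:
--         if (r, c + 1) in cells:
--             edges += 1
--         if (r + 1, c) in cells:
--             edges += 1
--     return 4 * len(cells) - 2 * edges
-- ===== Notes on version B (the rewrite author's own statement) =====
-- stated objective: alternative
-- what changed: Instead of subtracting 1 for each of the four present neighbours of every cell, B counts each shared edge exactly once by checking only the right and down neighbours, returning 4*len(cells) - 2*edges.
import Mathlib
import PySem

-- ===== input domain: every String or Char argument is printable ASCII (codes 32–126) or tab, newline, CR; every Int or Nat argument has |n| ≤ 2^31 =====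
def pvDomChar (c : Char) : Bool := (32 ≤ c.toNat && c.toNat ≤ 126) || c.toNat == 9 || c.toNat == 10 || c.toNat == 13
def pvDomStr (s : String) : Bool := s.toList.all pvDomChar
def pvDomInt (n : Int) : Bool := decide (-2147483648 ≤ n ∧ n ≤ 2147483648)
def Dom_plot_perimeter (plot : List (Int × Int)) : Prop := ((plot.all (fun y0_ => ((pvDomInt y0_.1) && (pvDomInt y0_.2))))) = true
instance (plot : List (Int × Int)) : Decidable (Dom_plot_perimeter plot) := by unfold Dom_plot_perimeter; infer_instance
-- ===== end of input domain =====

-- B counts each shared edge once (right/down neighbours only) and returns 4*|cells| - 2*edges,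
-- instead of A's per-cell subtraction of 1 for each of the four present neighbours.

-- ===== PORT A =====
def DIRECTIONS : List (Int × Int) := [(-1, 0), (0, 1), (1, 0), (0, -1)]

def get_neighbours (current_position : Int × Int) : List (Int × Int) :=
  DIRECTIONS.map (fun direction => (current_position.1 + direction.1, current_position.2 + direction.2))

def plot_perimeter (plot : List (Int × Int)) : Int :=
  plot.foldl (fun perimeter position =>
    (get_neighbours position).foldl
      (fun perimeter neighbour => if neighbour ∈ plot then perimeter - 1 else perimeter)
      (perimeter + 4)) 0

-- ===== PORT B =====
def plot_perimeter_alt (plot : List (Int × Int)) : Int :=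
  let cells : PySem.Set (Int × Int) := PySem.Set.ofList plot
  let edges : Int := cells.foldl (fun edges rc =>
    let edges := if (rc.1, rc.2 + 1) ∈ cells then edges + 1 else edges
    if (rc.1 + 1, rc.2) ∈ cells then edges + 1 else edges) 0
  4 * (cells.length : Int) - 2 * edges

-- ===== PRECONDITION & SPEC =====
-- plot is a Python set of cells, modelled as a list of DISTINCT elements (type convention);
-- Pre_ states exactly that distinctness, it excludes nothing a caller can pass.
def Pre_plot_perimeter (plot : List (Int × Int)) : Prop := plot.Nodup
instance (plot : List (Int × Int)) : Decidable (Pre_plot_perimeter plot) := by unfold Pre_plot_perimeter; infer_instance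
def pvWitness_plot_perimeter : (List (Int × Int)) := [(0, 0), (0, 1), (1, 1)]

def Spec_plot_perimeter (plot : List (Int × Int)) (out : Int) : Prop := out = plot_perimeter_alt plot
instance (plot : List (Int × Int)) (out : Int) : Decidable (Spec_plot_perimeter plot out) := by unfold Spec_plot_perimeter; infer_instance

-- ===== CLAIM (what is proved, stated in full; the proofs are below) =====
def Claim_equal_plot_perimeter : Prop := ∀ (plot : List (Int × Int)), Dom_plot_perimeter plot → Pre_plot_perimeter plot → Spec_plot_perimeter plot (plot_perimeter plot)

-- ===== LEMMAS AND PROOFS =====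

-- indicator of membership
def ind (l : List (Int × Int)) (q : Int × Int) : Int := if q ∈ l then 1 else 0

-- per-cell contribution of A's inner loop
def cellA (l : List (Int × Int)) (p : Int × Int) : Int :=
  4 - ind l (p.1 - 1, p.2) - ind l (p.1, p.2 + 1) - ind l (p.1 + 1, p.2) - ind l (p.1, p.2 - 1)

-- per-cell contribution of B's edge loop
def cellB (l : List (Int × Int)) (p : Int × Int) : Int :=
  ind l (p.1, p.2 + 1) + ind l (p.1 + 1, p.2)

lemma innerA (plot : List (Int × Int)) (p : Int × Int) (per : Int) :
    (get_neighbours p).foldl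
      (fun perimeter neighbour => if neighbour ∈ plot then perimeter - 1 else perimeter)
      (per + 4) = per + cellA plot p := by
  have e1 : (p.1 + (-1 : Int), p.2 + (0 : Int)) = (p.1 - 1, p.2) := by
    rw [Prod.mk.injEq]; constructor <;> ring
  have e2 : (p.1 + (0 : Int), p.2 + (1 : Int)) = (p.1, p.2 + 1) := by
    rw [Prod.mk.injEq]; constructor <;> ring
  have e3 : (p.1 + (1 : Int), p.2 + (0 : Int)) = (p.1 + 1, p.2) := by
    rw [Prod.mk.injEq]; constructor <;> ring
  have e4 : (p.1 + (0 : Int), p.2 + (-1 : Int)) = (p.1, p.2 - 1) := by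
    rw [Prod.mk.injEq]; constructor <;> ring
  simp only [get_neighbours, DIRECTIONS, List.map_cons, List.map_nil,
    List.foldl_cons, List.foldl_nil, e1, e2, e3, e4, cellA, ind]
  split_ifs <;> ring

lemma A_as_sum (plot : List (Int × Int)) :
    plot_perimeter plot = (plot.map (cellA plot)).sum := by
  unfold plot_perimeter
  have hf : (fun (perimeter : Int) position =>
      (get_neighbours position).foldl
        (fun perimeter neighbour => if neighbour ∈ plot then perimeter - 1 else perimeter)
        (perimeter + 4)) = fun per pos => per + cellA plot pos := by
    funext per pos; exact innerA plot pos per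
  rw [hf]
  have : ∀ (l : List (Int × Int)) (a : Int),
      l.foldl (fun per pos => per + cellA plot pos) a = a + (l.map (cellA plot)).sum := by
    intro l
    induction l with
    | nil => simp
    | cons x xs ih => intro a; simp only [List.foldl_cons, List.map_cons, List.sum_cons, ih]; ring
  simpa using this plot 0

lemma B_as_sum (cells : List (Int × Int)) :
    (cells.foldl (fun edges rc =>
      let edges := if (rc.1, rc.2 + 1) ∈ cells then edges + 1 else edges
      if (rc.1 + 1, rc.2) ∈ cells then edges + 1 else edges) 0)
      = (cells.map (cellB cells)).sum := by
  have : ∀ (l : List (Int × Int)) (a : Int),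
      l.foldl (fun edges rc =>
        let edges := if (rc.1, rc.2 + 1) ∈ cells then edges + 1 else edges
        if (rc.1 + 1, rc.2) ∈ cells then edges + 1 else edges) a
        = a + (l.map (cellB cells)).sum := by
    intro l
    induction l with
    | nil => simp
    | cons x xs ih =>
      intro a
      simp only [List.foldl_cons, List.map_cons, List.sum_cons, ih, cellB, ind]
      split_ifs <;> ring
  simpa using this cells 0

-- each shared edge is hit the same number of times from either side: shifting by v versus -v
lemma card_shift (l : List (Int × Int)) (v : Int × Int) :
    (l.toFinset.filter (fun p => (p.1 + v.1, p.2 + v.2) ∈ l)).card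
      = (l.toFinset.filter (fun p => (p.1 - v.1, p.2 - v.2) ∈ l)).card := by
  classical
  apply Finset.card_bij' (i := fun p _ => ((p.1 + v.1, p.2 + v.2) : Int × Int))
    (j := fun q _ => ((q.1 - v.1, q.2 - v.2) : Int × Int))
  · intro a ha
    simp only [Finset.mem_filter, List.mem_toFinset] at ha ⊢
    constructor
    · exact ha.2
    · have : ((a.1 + v.1 : Int) - v.1, (a.2 + v.2 : Int) - v.2) = a := by
        rw [Prod.mk.injEq]; constructor <;> ring
      rw [this]; exact ha.1
  · intro a ha
    simp only [Finset.mem_filter, List.mem_toFinset] at ha ⊢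
    constructor
    · exact ha.2
    · have : ((a.1 - v.1 : Int) + v.1, (a.2 - v.2 : Int) + v.2) = a := by
        rw [Prod.mk.injEq]; constructor <;> ring
      rw [this]; exact ha.1
  · intro a _; rw [Prod.mk.injEq]; constructor <;> ring
  · intro a _; rw [Prod.mk.injEq]; constructor <;> ring

lemma symmH (l : List (Int × Int)) :
    ∑ p ∈ l.toFinset, ind l (p.1 - 1, p.2) = ∑ p ∈ l.toFinset, ind l (p.1 + 1, p.2) := by
  classical
  simp only [ind]
  rw [Finset.sum_boole, Finset.sum_boole]
  have h := card_shift l (1, 0)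
  simp only [sub_zero, add_zero] at h
  exact_mod_cast h.symm

lemma symmV (l : List (Int × Int)) :
    ∑ p ∈ l.toFinset, ind l (p.1, p.2 - 1) = ∑ p ∈ l.toFinset, ind l (p.1, p.2 + 1) := by
  classical
  simp only [ind]
  rw [Finset.sum_boole, Finset.sum_boole]
  have h := card_shift l (0, 1)
  simp only [sub_zero, add_zero] at h
  exact_mod_cast h.symm

lemma main_sum (l : List (Int × Int)) (hl : l.Nodup) :
    (l.map (cellA l)).sum = 4 * (l.length : Int) - 2 * (l.map (cellB l)).sum := by
  classical
  rw [← List.sum_toFinset _ hl, ← List.sum_toFinset _ hl]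
  simp only [cellA, cellB]
  rw [Finset.sum_sub_distrib, Finset.sum_sub_distrib, Finset.sum_sub_distrib,
    Finset.sum_sub_distrib, Finset.sum_add_distrib, Finset.sum_const, symmH, symmV]
  have hc : l.toFinset.card = l.length := List.toFinset_card_of_nodup hl
  rw [hc]
  ring

-- ===== VERDICT (by name: the statement is the Claim_ definition above) =====
theorem plot_perimeter_spec : Claim_equal_plot_perimeter := by
  intro plot _ hpre
  unfold Spec_plot_perimeter
  have halt : plot_perimeter_alt plot
      = 4 * ((PySem.Set.ofList plot).length : Int)
        - 2 * ((PySem.Set.ofList plot).foldl (fun edges rc =>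
            let edges := if (rc.1, rc.2 + 1) ∈ PySem.Set.ofList plot then edges + 1 else edges
            if (rc.1 + 1, rc.2) ∈ PySem.Set.ofList plot then edges + 1 else edges) 0) := rfl
  rw [A_as_sum, halt, PySem.Set.ofList_eq_self_of_nodup plot hpre, B_as_sum]
  exact main_sum plot hpre
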